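-- pv_equiv track=rewrite | github.com/adminiavs/HRM-Lisp | utils/mini_lisp.py | _paren_balance
-- ===== SOURCE A (Python) =====
-- def _paren_balance(s: str) -> int:
--     bal = 0
--     in_string = False
--     escaped = False
--     for ch in s:
--         if in_string:
--             if escaped:
--                 escaped = False
--             elif ch == "\\":
--                 escaped = True
--             elif ch == '"':
--                 in_string = False
--             continue
--         if ch == '"':
--             in_string = True
--         elif ch == "(":
--             bal += 1
--         elif ch == ")":
--             bal -= 1
--     return bal
-- ===== SOURCE B (Python) =====
-- def _paren_balance(s: str) -> int:
--     bal = 0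
--     i = 0
--     n = len(s)
--     while i < n:
--         c = s[i]
--         if c == '"':
--             # skip the whole string literal in an inner scan
--             i += 1
--             while i < n:
--                 if s[i] == "\\":
--                     i += 2
--                 elif s[i] == '"':
--                     i += 1
--                     break
--                 else:
--                     i += 1
--         elif c == "(":
--             bal += 1
--             i += 1
--         elif c == ")":
--             bal -= 1
--             i += 1
--         else:
--             i += 1
--     return bal
-- ===== Notes on version B (the rewrite author's own statement) =====
-- stated objective: alternative
-- what changed: Replaces A's single pass with in_string/escaped boolean state by an index scan whose inner loop skips each string literal wholesale (i += 2 on escapes), so no per-character flag state is carried.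
import Mathlib
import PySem

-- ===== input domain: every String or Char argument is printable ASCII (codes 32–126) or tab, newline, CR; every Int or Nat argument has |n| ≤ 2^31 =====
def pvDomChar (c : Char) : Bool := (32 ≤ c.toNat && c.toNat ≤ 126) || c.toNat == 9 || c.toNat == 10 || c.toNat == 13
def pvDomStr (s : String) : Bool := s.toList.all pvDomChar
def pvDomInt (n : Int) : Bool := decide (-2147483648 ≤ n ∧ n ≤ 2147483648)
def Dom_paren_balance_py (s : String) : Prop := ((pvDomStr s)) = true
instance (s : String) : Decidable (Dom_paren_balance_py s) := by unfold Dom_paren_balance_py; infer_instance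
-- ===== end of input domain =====

-- B replaces A's one-pass in_string/escaped flag machine by an index scan with an
-- inner loop that skips each string literal whole (objective: alternative decomposition).


-- ===== PORT A =====
-- state = (bal, in_string, escaped); one step per character, branches in A's order
def pvStepA (st : Int × Bool × Bool) (ch : Char) : Int × Bool × Bool :=
  let (bal, inS, esc) := st
  if inS then
    if esc then (bal, inS, false)
    else if ch = '\\' then (bal, inS, true)
    else if ch = '"' then (bal, false, esc)
    else (bal, inS, esc)
  else
    if ch = '"' then (bal, true, esc)
    else if ch = '(' then (bal + 1, inS, esc)
    else if ch = ')' then (bal - 1, inS, esc)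
    else (bal, inS, esc)

def paren_balance_py (s : String) : Int :=
  (s.toList.foldl pvStepA (0, false, false)).1

-- ===== PORT B =====
-- inner while loop of B: consume the rest of a string literal, return what follows
-- ('\\' does i += 2, i.e. also drops the following character)
def pvSkipStr : List Char → List Char
  | [] => []
  | c :: rest =>
    if c = '\\' then pvSkipStr (rest.drop 1)
    else if c = '"' then rest
    else pvSkipStr rest
termination_by l => l.length
decreasing_by all_goals (simp; try omega)

theorem pvSkipStr_length (l : List Char) : (pvSkipStr l).length ≤ l.length := by
  induction l using pvSkipStr.induct <;> simp_all [pvSkipStr] <;> omega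

-- outer while loop of B, bal as accumulator
def pvGoB (bal : Int) : List Char → Int
  | [] => bal
  | c :: rest =>
    if c = '"' then pvGoB bal (pvSkipStr rest)
    else if c = '(' then pvGoB (bal + 1) rest
    else if c = ')' then pvGoB (bal - 1) rest
    else pvGoB bal rest
termination_by l => l.length
decreasing_by all_goals (have h := pvSkipStr_length rest; try simp; try omega)

def paren_balance_py_alt (s : String) : Int := pvGoB 0 s.toList

-- ===== PRECONDITION & SPEC =====
def Spec_paren_balance_py (s : String) (out : Int) : Prop := out = paren_balance_py_alt s
instance (s : String) (out : Int) : Decidable (Spec_paren_balance_py s out) := by unfold Spec_paren_balance_py; infer_instance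

-- ===== CLAIM (what is proved, stated in full; the proofs are below) =====
def Claim_equal_paren_balance_py : Prop := ∀ (s : String), Dom_paren_balance_py s → Spec_paren_balance_py s (paren_balance_py s)

-- ===== LEMMAS AND PROOFS =====
-- Simultaneous invariant for A's fold started outside (P) and inside (Q) a string
-- literal, by strong induction on length (the escape case drops two characters at once).
theorem pvMain : ∀ (n : ℕ) (l : List Char), l.length ≤ n →
    (∀ bal, (l.foldl pvStepA (bal, false, false)).1 = pvGoB bal l) ∧
    (∀ bal, (l.foldl pvStepA (bal, true, false)).1 = pvGoB bal (pvSkipStr l)) := by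
  intro n
  induction n with
  | zero =>
    intro l hl
    have : l = [] := List.length_eq_zero_iff.mp (Nat.le_zero.mp hl)
    subst this; simp [pvGoB, pvSkipStr]
  | succ n ih =>
    intro l hl
    match l with
    | [] => simp [pvGoB, pvSkipStr]
    | c :: rest =>
      simp only [List.length_cons, Nat.succ_le_succ_iff] at hl
      constructor
      · intro bal
        by_cases hq : c = '"'
        · subst hq
          simpa [pvStepA, pvGoB] using (ih rest hl).2 bal
        · by_cases ho : c = '('
          · subst ho; simpa [pvStepA, pvGoB] using (ih rest hl).1 (bal + 1)
          · by_cases hc : c = ')'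
            · subst hc; simpa [pvStepA, pvGoB, ho] using (ih rest hl).1 (bal - 1)
            · simpa [pvStepA, pvGoB, hq, ho, hc] using (ih rest hl).1 bal
      · intro bal
        by_cases hb : c = '\\'
        · subst hb
          match rest with
          | [] => simp [pvStepA, pvSkipStr, pvGoB]
          | d :: r =>
            simp only [List.length_cons] at hl
            have hr : r.length ≤ n := by omega
            have h1 := (ih r hr).2 bal
            simp only [pvSkipStr, List.foldl_cons, List.drop_succ_cons, List.drop_zero]
            simpa [pvStepA] using h1
        · by_cases hq : c = '"'
          · subst hq; simpa [pvStepA, pvSkipStr] using (ih rest hl).1 bal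
          · simpa [pvStepA, pvSkipStr, hb, hq] using (ih rest hl).2 bal

-- ===== VERDICT (by name: the statement is the Claim_ definition above) =====
theorem paren_balance_py_spec : Claim_equal_paren_balance_py := by
  intro s _
  unfold Spec_paren_balance_py paren_balance_py paren_balance_py_alt
  exact (pvMain s.toList.length s.toList le_rfl).1 0
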